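-- pv_equiv track=rewrite | github.com/Populustremuloides/persystems | persystems/renorm.py | contiguous_blocks_ring
-- ===== SOURCE A (Python) =====
-- from typing import List, Sequence, Tuple
--
-- def contiguous_blocks_ring(N: int, M: int) -> List[Sequence[int]]:
--     """
--     Partition N fine states into M contiguous blocks on a ring.
--     Last block absorbs remainder if N % M != 0.
--     Example: N=10, M=4 → blocks [[0,1,2],[3,4],[5,6],[7,8,9]]
--     """
--     if M <= 0 or M > N:
--         raise ValueError("Require 1 <= M <= N.")
--     base = N // M
--     rem = N % M
--     blocks: List[Sequence[int]] = []
--     start = 0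
--     for i in range(M):
--         size = base + (1 if i < rem else 0)
--         idxs = [(start + k) % N for k in range(size)]
--         blocks.append(idxs)
--         start += size
--     flat = sorted([j for J in blocks for j in J])
--     assert flat == list(range(N)), "Blocks must cover all fine indices exactly once."
--     return blocks
-- ===== SOURCE B (Python) =====
-- def contiguous_blocks_ring(N, M):
--     if M <= 0 or M > N:
--         raise ValueError("Require 1 <= M <= N.")
--     base, rem = divmod(N, M)
--     split = rem * (base + 1)
--     blocks = [[] for _ in range(M)]
--     for j in range(N):
--         b = j // (base + 1) if j < split else rem + (j - split) // base
--         blocks[b].append(j)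
--     return blocks
-- ===== Notes on version B (the rewrite author's own statement) =====
-- stated objective: faster
-- what changed: A generates the output block-by-block (outer loop over the M blocks, inner per-element modular index construction, then a sort+assert coverage pass); B inverts the mapping: it scatters, in one pass over the N elements, each index j into its owning block computed by a closed-form formula (j//(base+1) below the split point rem*(base+1), else rem+(j-split)//base), with no coverage pass.
import Mathlib
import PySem

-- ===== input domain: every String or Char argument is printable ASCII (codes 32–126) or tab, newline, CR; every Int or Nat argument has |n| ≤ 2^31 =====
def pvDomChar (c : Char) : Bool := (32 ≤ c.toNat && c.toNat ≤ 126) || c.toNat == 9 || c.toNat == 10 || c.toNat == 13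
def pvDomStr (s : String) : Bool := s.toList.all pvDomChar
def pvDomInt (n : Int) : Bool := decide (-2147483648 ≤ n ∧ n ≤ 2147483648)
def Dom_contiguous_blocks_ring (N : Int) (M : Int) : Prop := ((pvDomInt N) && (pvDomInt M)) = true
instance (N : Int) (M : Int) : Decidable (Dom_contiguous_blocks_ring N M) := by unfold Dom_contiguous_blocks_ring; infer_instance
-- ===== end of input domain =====

-- B replaces A's block-by-block construction (per-block modular index lists plus a sort+assert
-- coverage pass) by a single scatter pass over the elements: each index j is appended to the block
-- computed by a closed-form owner formula (alternative: inverse mapping instead of forward generation).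


-- ===== PORT A =====
-- Literal port of A. The ValueError branch (M <= 0 or M > N) is excluded by Pre_; the final
-- assert always passes on admitted inputs (the blocks cover range(N) by construction), so it
-- is a no-op and is not re-checked here.
def contiguous_blocks_ring (N : Int) (M : Int) : List (List Int) :=
  if M ≤ 0 ∨ N < M then []  -- Python raises ValueError here; outside Pre_
  else
    let base := PySem.Int.floordiv N M
    let rem := PySem.Int.mod N M
    let st := (PySem.List.pyRange 0 M 1).foldl
      (fun (st : List (List Int) × Int) i =>
        let size := base + (if i < rem then 1 else 0)
        let idxs := (PySem.List.pyRange 0 size 1).map (fun k => PySem.Int.mod (st.2 + k) N)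
        (st.1 ++ [idxs], st.2 + size))
      ([], 0)
    st.1

-- ===== PORT B =====
-- Literal port of Source B: one pass over range(N), each j appended to blocks[owner j] where the
-- owner is the closed-form formula; blocks[b].append(j) is List.modify (b is always in [0, M)
-- on admitted inputs, so .toNat is exact).
def contiguous_blocks_ring_alt (N : Int) (M : Int) : List (List Int) :=
  if M ≤ 0 ∨ N < M then []  -- Python raises ValueError here; outside Pre_
  else
    let base := PySem.Int.floordiv N M
    let rem := PySem.Int.mod N M
    let split := rem * (base + 1)
    let blocks := (List.range M.toNat).map (fun _ => ([] : List Int))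
    (PySem.List.pyRange 0 N 1).foldl
      (fun (blocks : List (List Int)) j =>
        let b := if j < split then PySem.Int.floordiv j (base + 1)
                 else rem + PySem.Int.floordiv (j - split) base
        blocks.modify b.toNat (· ++ [j]))
      blocks

-- ===== PRECONDITION & SPEC =====
-- A raises ValueError exactly when M <= 0 or M > N; those inputs are excluded.
def Pre_contiguous_blocks_ring (N : Int) (M : Int) : Prop := 1 ≤ M ∧ M ≤ N
instance (N : Int) (M : Int) : Decidable (Pre_contiguous_blocks_ring N M) := by
  unfold Pre_contiguous_blocks_ring; infer_instance
def pvWitness_contiguous_blocks_ring : Int × Int := (10, 4)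

def Spec_contiguous_blocks_ring (N : Int) (M : Int) (out : List (List Int)) : Prop := out = contiguous_blocks_ring_alt N M
instance (N : Int) (M : Int) (out : List (List Int)) : Decidable (Spec_contiguous_blocks_ring N M out) := by unfold Spec_contiguous_blocks_ring; infer_instance

-- ===== CLAIM (what is proved, stated in full; the proofs are below) =====
def Claim_equal_contiguous_blocks_ring : Prop := ∀ (N : Int) (M : Int), Dom_contiguous_blocks_ring N M → Pre_contiguous_blocks_ring N M → Spec_contiguous_blocks_ring N M (contiguous_blocks_ring N M)

-- ===== LEMMAS AND PROOFS =====

-- cut i = start offset of block i; size i = length of block i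
def pvCut (base rem : Int) (i : Nat) : Int := base * i + min (i : Int) rem
def pvSize (base rem : Int) (i : Nat) : Int := base + (if (i : Int) < rem then 1 else 0)
-- owner j = index of the block containing j (B's closed-form formula)
def pvOwner (base rem split : Int) (j : Int) : Int :=
  if j < split then PySem.Int.floordiv j (base + 1)
  else rem + PySem.Int.floordiv (j - split) base

theorem pvCut_succ (base rem : Int) (i : Nat) :
    pvCut base rem (i + 1) = pvCut base rem i + pvSize base rem i := by
  unfold pvCut pvSize
  push_cast
  split_ifs with h <;> [skip; skip] <;> ring_nf <;> omega

theorem pvCut_nonneg (base rem : Int) (hb : 0 ≤ base) (hr : 0 ≤ rem) (i : Nat) :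
    0 ≤ pvCut base rem i := by
  unfold pvCut
  have : 0 ≤ base * (i : Int) := mul_nonneg hb (by positivity)
  omega

theorem pvCut_mono (base rem : Int) (hb : 0 ≤ base) {i j : Nat} (hij : i ≤ j) :
    pvCut base rem i ≤ pvCut base rem j := by
  unfold pvCut
  have : base * (i : Int) ≤ base * (j : Int) :=
    mul_le_mul_of_nonneg_left (by exact_mod_cast hij) hb
  omega

theorem pvSize_nonneg (base rem : Int) (hb : 0 ≤ base) (i : Nat) : 0 ≤ pvSize base rem i := by
  unfold pvSize; split_ifs <;> omega

-- common canonical form: block i = pyRange (cut i) (cut (i+1))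
def pvCanon (base rem : Int) (m : Nat) : List (List Int) :=
  (List.range m).map (fun i => PySem.List.pyRange (pvCut base rem i) (pvCut base rem (i + 1)) 1)

-- ---- A = canonical ----
theorem A_inv (N M base rem : Int) (hb : 0 ≤ base) (hr : 0 ≤ rem)
    (hN : pvCut base rem M.toNat = N) (hNpos : 0 < N) :
    ∀ j : Nat, j ≤ M.toNat →
      (PySem.List.pyRange 0 (j : Int) 1).foldl
        (fun (st : List (List Int) × Int) i =>
          let size := base + (if i < rem then 1 else 0)
          let idxs := (PySem.List.pyRange 0 size 1).map (fun k => PySem.Int.mod (st.2 + k) N)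
          (st.1 ++ [idxs], st.2 + size))
        ([], 0)
      = (pvCanon base rem j, pvCut base rem j) := by
  intro j hj
  induction j with
  | zero => simp [pvCanon, pvCut, min_eq_left hr]
  | succ j ih =>
    have hj' : j ≤ M.toNat := Nat.le_of_succ_le hj
    have hrange : PySem.List.pyRange 0 ((j : Int) + 1) 1
        = PySem.List.pyRange 0 (j : Int) 1 ++ [(j : Int)] :=
      PySem.List.pyRange_one_succ_right (by positivity)
    have hcast : ((j + 1 : Nat) : Int) = (j : Int) + 1 := by push_cast; ring
    rw [hcast, hrange, List.foldl_append, ih hj']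
    simp only [List.foldl_cons, List.foldl_nil]
    -- the step at index j
    have hsize : base + (if (j : Int) < rem then 1 else 0) = pvSize base rem j := rfl
    have hblk : ((PySem.List.pyRange 0 (pvSize base rem j) 1).map
          (fun k => PySem.Int.mod (pvCut base rem j + k) N))
        = PySem.List.pyRange (pvCut base rem j) (pvCut base rem (j + 1)) 1 := by
      have hle : pvCut base rem (j + 1) ≤ N := hN ▸ pvCut_mono base rem hb hj
      rw [PySem.List.pyRange_one, PySem.List.pyRange_one]
      have hlen : (pvSize base rem j - 0).toNat
          = (pvCut base rem (j + 1) - pvCut base rem j).toNat := by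
        rw [pvCut_succ]; ring_nf
      rw [hlen, List.map_map]
      apply List.map_congr_left
      intro k hk
      have hk' : (k : Int) < pvSize base rem j := by
        rw [List.mem_range] at hk
        have h0 : 0 ≤ pvSize base rem j := pvSize_nonneg base rem hb j
        omega
      simp only [Function.comp]
      have h0 : 0 ≤ pvCut base rem j + (0 + (k : Int)) := by
        have := pvCut_nonneg base rem hb hr j
        omega
      have hlt : pvCut base rem j + (0 + (k : Int)) < N := by
        have := pvCut_succ base rem j
        omega
      rw [PySem.Int.mod_eq_emod_of_pos hNpos, Int.emod_eq_of_lt h0 hlt]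
      ring
    rw [hsize, hblk]
    simp only [Prod.mk.injEq]
    constructor
    · unfold pvCanon
      rw [List.range_succ, List.map_append]
      simp
    · simp [pvCut_succ]

theorem A_eq_canon (N M : Int) (hP : Pre_contiguous_blocks_ring N M) :
    contiguous_blocks_ring N M
      = pvCanon (PySem.Int.floordiv N M) (PySem.Int.mod N M) M.toNat := by
  obtain ⟨h1, h2⟩ := hP
  have hM : 0 < M := h1
  have hNpos : 0 < N := lt_of_lt_of_le hM h2
  unfold contiguous_blocks_ring
  rw [if_neg (by omega)]
  set base := PySem.Int.floordiv N M with hbase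
  set rem := PySem.Int.mod N M with hrem
  have hb : 0 ≤ base := by
    rw [hbase, PySem.Int.floordiv_eq_ediv_of_pos hM]
    exact Int.ediv_nonneg (by omega) (by omega)
  have hr : 0 ≤ rem := PySem.Int.mod_nonneg N hM
  have hrM : rem < M := PySem.Int.mod_lt N hM
  have hmul : base * M + rem = N := PySem.Int.floordiv_mul_add_mod N M
  have hMt : ((M.toNat : Nat) : Int) = M := Int.toNat_of_nonneg (le_of_lt hM)
  have hN : pvCut base rem M.toNat = N := by
    unfold pvCut; rw [hMt]; omega
  have := A_inv N M base rem hb hr hN hNpos M.toNat (le_refl _)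
  rw [hMt] at this
  simp only [this]

-- ---- B = canonical ----

-- modify on a range-tabulated list is a pointwise update
theorem modify_range_map {α : Type} (m k : Nat) (g : Nat → α) (f : α → α) :
    ((List.range m).map g).modify k f
      = (List.range m).map (fun b => if b = k then f (g b) else g b) := by
  apply List.ext_getElem
  · simp
  · intro i h1 h2
    rw [List.getElem_modify]
    simp [eq_comm]

-- the scatter loop tabulates: block b collects exactly the elements owned by b, in order
theorem scatter_inv {owner : Int → Int} (m : Nat) :
    ∀ (xs : List Int) (g : Nat → List Int),
    (∀ j ∈ xs, 0 ≤ owner j ∧ (owner j).toNat < m) →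
    xs.foldl (fun (bl : List (List Int)) j => bl.modify (owner j).toNat (· ++ [j]))
        ((List.range m).map g)
      = (List.range m).map (fun b => g b ++ xs.filter (fun j => owner j == (b : Int))) := by
  intro xs
  induction xs with
  | nil => intro g _; simp
  | cons j xs ih =>
    intro g h
    obtain ⟨hj0, hjm⟩ := h j (List.mem_cons_self)
    rw [List.foldl_cons, modify_range_map m (owner j).toNat g _,
      ih _ (fun x hx => h x (List.mem_cons_of_mem _ hx))]
    apply List.map_congr_left
    intro b hb
    rw [List.mem_range] at hb
    by_cases hbj : (b : Int) = owner j
    · have hb' : b = (owner j).toNat := by omega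
      rw [if_pos hb', List.filter_cons, if_pos (by simpa using hbj.symm)]
      simp
    · have hb' : b ≠ (owner j).toNat := by omega
      rw [if_neg hb', List.filter_cons, if_neg (by simpa using fun h => hbj h.symm)]

-- the owner formula sends each element of block b to b
theorem owner_interval (base rem : Int) (hb : 0 < base) (b : Nat) (j : Int)
    (h1 : pvCut base rem b ≤ j) (h2 : j < pvCut base rem (b + 1)) :
    pvOwner base rem (rem * (base + 1)) j = (b : Int) := by
  unfold pvOwner
  unfold pvCut at h1 h2
  by_cases hcase : (b : Int) < rem
  · -- block among the first rem (size base+1)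
    have hmin1 : min (b : Int) rem = b := min_eq_left (by omega)
    have hmin2 : min ((b : Int) + 1) rem = (b : Int) + 1 := min_eq_left (by omega)
    rw [hmin1] at h1
    push_cast at h2
    rw [hmin2] at h2
    have hsplit : j < rem * (base + 1) := by
      have : ((b : Int) + 1) * (base + 1) ≤ rem * (base + 1) :=
        mul_le_mul_of_nonneg_right (by omega) (by omega)
      nlinarith
    rw [if_pos hsplit, PySem.Int.floordiv_eq_iff_of_pos (by omega)]
    constructor <;> nlinarith
  · -- block among the last M - rem (size base)
    have hbr : rem ≤ (b : Int) := by omega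
    have hmin1 : min (b : Int) rem = rem := min_eq_right hbr
    have hmin2 : min ((b : Int) + 1) rem = rem := min_eq_right (by omega)
    rw [hmin1] at h1
    push_cast at h2
    rw [hmin2] at h2
    have hsplit : ¬ j < rem * (base + 1) := by
      have : rem * base ≤ (b : Int) * base := mul_le_mul_of_nonneg_right hbr (by omega)
      nlinarith
    rw [if_neg hsplit]
    have : PySem.Int.floordiv (j - rem * (base + 1)) base = (b : Int) - rem := by
      rw [PySem.Int.floordiv_eq_iff_of_pos hb]
      constructor <;> nlinarith
    rw [this]; ring

-- every j in [0, cut m) lies in some block interval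
theorem cut_exists (base rem : Int) (hr : 0 ≤ rem) (j : Int) (hj : 0 ≤ j) :
    ∀ m : Nat, j < pvCut base rem m →
      ∃ i : Nat, i < m ∧ pvCut base rem i ≤ j ∧ j < pvCut base rem (i + 1) := by
  intro m
  induction m with
  | zero =>
    intro h
    exfalso
    have : pvCut base rem 0 = 0 := by simp [pvCut]; omega
    omega
  | succ m ih =>
    intro h
    by_cases hm : pvCut base rem m ≤ j
    · exact ⟨m, Nat.lt_succ_self m, hm, h⟩
    · obtain ⟨i, h1, h2, h3⟩ := ih (by omega)
      exact ⟨i, Nat.lt_succ_of_lt h1, h2, h3⟩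

-- on [0, N) the owner formula characterises block membership
theorem owner_iff (base rem N : Int) (hb : 0 < base) (hr : 0 ≤ rem) (M : Nat)
    (hN : pvCut base rem M = N) (b : Nat) (hbM : b < M) (j : Int) (hj0 : 0 ≤ j) (hjN : j < N) :
    pvOwner base rem (rem * (base + 1)) j = (b : Int)
      ↔ pvCut base rem b ≤ j ∧ j < pvCut base rem (b + 1) := by
  constructor
  · intro h
    obtain ⟨i, hiM, hi1, hi2⟩ := cut_exists base rem hr j hj0 M (hN ▸ hjN)
    have : pvOwner base rem (rem * (base + 1)) j = (i : Int) :=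
      owner_interval base rem hb i j hi1 hi2
    have hib : i = b := by omega
    subst hib; exact ⟨hi1, hi2⟩
  · intro ⟨h1, h2⟩
    exact owner_interval base rem hb b j h1 h2

theorem B_eq_canon (N M : Int) (hP : Pre_contiguous_blocks_ring N M) :
    contiguous_blocks_ring_alt N M
      = pvCanon (PySem.Int.floordiv N M) (PySem.Int.mod N M) M.toNat := by
  obtain ⟨h1, h2⟩ := hP
  have hM : 0 < M := h1
  have hNpos : 0 < N := lt_of_lt_of_le hM h2
  unfold contiguous_blocks_ring_alt
  rw [if_neg (by omega)]
  set base := PySem.Int.floordiv N M with hbase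
  set rem := PySem.Int.mod N M with hrem
  have hb : 0 < base := by
    rw [hbase, PySem.Int.floordiv_eq_ediv_of_pos hM]
    exact Int.le_ediv_iff_mul_le hM |>.2 (by omega)
  have hr : 0 ≤ rem := PySem.Int.mod_nonneg N hM
  have hrM : rem < M := PySem.Int.mod_lt N hM
  have hmul : base * M + rem = N := PySem.Int.floordiv_mul_add_mod N M
  have hMt : ((M.toNat : Nat) : Int) = M := Int.toNat_of_nonneg (le_of_lt hM)
  have hN : pvCut base rem M.toNat = N := by
    unfold pvCut; rw [hMt]; omega
  -- the fold is the scatter loop with owner = pvOwner (definitional unfolding of the lets)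
  show (PySem.List.pyRange 0 N 1).foldl
      (fun (blocks : List (List Int)) j =>
        blocks.modify (pvOwner base rem (rem * (base + 1)) j).toNat (· ++ [j]))
      ((List.range M.toNat).map (fun _ => ([] : List Int)))
    = pvCanon base rem M.toNat
  rw [scatter_inv M.toNat (PySem.List.pyRange 0 N 1) (fun _ => [])
    (by
      intro j hj
      rw [PySem.List.mem_pyRange_one] at hj
      obtain ⟨i, hiM, hi1, hi2⟩ := cut_exists base rem hr j hj.1 M.toNat (hN ▸ hj.2)
      have := owner_interval base rem hb i j hi1 hi2
      rw [this]
      constructor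
      · exact Int.natCast_nonneg i
      · simpa using hiM)]
  unfold pvCanon
  apply List.map_congr_left
  intro b hbm
  rw [List.mem_range] at hbm
  simp only [List.nil_append]
  -- filter over [0,N) of "owner = b" is the interval [cut b, cut (b+1))
  have hc0 : 0 ≤ pvCut base rem b := pvCut_nonneg base rem (le_of_lt hb) hr b
  have hcb : pvCut base rem b ≤ pvCut base rem (b + 1) := pvCut_mono base rem (le_of_lt hb) (Nat.le_succ b)
  have hcN : pvCut base rem (b + 1) ≤ N := hN ▸ pvCut_mono base rem (le_of_lt hb) hbm
  rw [PySem.List.pyRange_one_append 0 (pvCut base rem b) N hc0 (le_trans hcb hcN),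
    PySem.List.pyRange_one_append (pvCut base rem b) (pvCut base rem (b + 1)) N hcb hcN,
    List.filter_append, List.filter_append]
  have hmem : ∀ (j : Int), 0 ≤ j → j < N →
      ((pvOwner base rem (rem * (base + 1)) j == (b : Int)) = true
        ↔ pvCut base rem b ≤ j ∧ j < pvCut base rem (b + 1)) := by
    intro j hj0 hjN
    rw [beq_iff_eq]
    exact owner_iff base rem N hb hr M.toNat hN b hbm j hj0 hjN
  rw [List.filter_eq_nil_iff.mpr (by
      intro j hj
      rw [PySem.List.mem_pyRange_one] at hj
      intro hc
      have := (hmem j hj.1 (lt_of_lt_of_le hj.2 (le_trans hcb hcN))).1 hc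
      omega),
    List.filter_eq_self.mpr (by
      intro j hj
      rw [PySem.List.mem_pyRange_one] at hj
      exact (hmem j (le_trans hc0 hj.1) (lt_of_lt_of_le hj.2 hcN)).2 ⟨hj.1, hj.2⟩),
    List.filter_eq_nil_iff.mpr (by
      intro j hj
      rw [PySem.List.mem_pyRange_one] at hj
      intro hc
      have := (hmem j (le_trans (le_trans hc0 hcb) hj.1) hj.2).1 hc
      omega)]
  simp

-- ===== VERDICT (by name: the statement is the Claim_ definition above) =====
theorem contiguous_blocks_ring_spec : Claim_equal_contiguous_blocks_ring := by
  intro N M _ hP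
  unfold Spec_contiguous_blocks_ring
  rw [A_eq_canon N M hP, B_eq_canon N M hP]
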